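-- pv_equiv track=rewrite | github.com/lihong0211/service-home | service/ai/chat.py | _dedupe_vision_content
-- ===== SOURCE A (Python) =====
-- def _collapse_repeated_phrase(s):
--     """若整段是同一短语重复多次，只保留一次。如 'ABABAB' -> 'AB'"""
--     if not s or len(s) < 2:
--         return s
--     n = len(s)
--     for period in range(1, n // 2 + 1):
--         if n % period != 0:
--             continue
--         if s == s[:period] * (n // period):
--             return s[:period]
--     return s
--
-- def _dedupe_vision_content(text):
--     """识图结果去重：合并连续重复的同一行 + 行内重复短语。"""
--     if not text or not text.strip():
--         return text
--     lines = [ln.strip() for ln in text.splitlines() if ln.strip()]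
--     deduped = []
--     for ln in lines:
--         ln = _collapse_repeated_phrase(ln)
--         if not ln:
--             continue
--         if not deduped or deduped[-1] != ln:
--             deduped.append(ln)
--     return "\n".join(deduped)
-- ===== SOURCE B (Python) =====
-- def _smallest_period(s):
--     """Smallest p >= 1 with s[i] == s[i - p] for all i in [p, len(s))."""
--     n = len(s)
--     p = 1
--     while p < n and any(s[i] != s[i - p] for i in range(p, n)):
--         p += 1
--     return p
--
-- def _dedupe_vision_content(text):
--     if not text or not text.strip():
--         return text
--     lines = []
--     for raw in text.splitlines():
--         ln = raw.strip()
--         if ln: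
--             p = _smallest_period(ln)
--             lines.append(ln[:p] if len(ln) % p == 0 else ln)
--     return "\n".join(x for x, prev in zip(lines, [None] + lines) if x != prev)
-- ===== Notes on version B (the rewrite author's own statement) =====
-- stated objective: alternative
-- what changed: The per-line collapse now computes the smallest period of the line by self-overlap comparison and applies a single divisibility test afterwards (instead of enumerating every divisor period and building and comparing a replicated string for each), and the consecutive-line dedup is a zip-with-predecessor filter instead of a loop inspecting the accumulator's last element.
import Mathlib
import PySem

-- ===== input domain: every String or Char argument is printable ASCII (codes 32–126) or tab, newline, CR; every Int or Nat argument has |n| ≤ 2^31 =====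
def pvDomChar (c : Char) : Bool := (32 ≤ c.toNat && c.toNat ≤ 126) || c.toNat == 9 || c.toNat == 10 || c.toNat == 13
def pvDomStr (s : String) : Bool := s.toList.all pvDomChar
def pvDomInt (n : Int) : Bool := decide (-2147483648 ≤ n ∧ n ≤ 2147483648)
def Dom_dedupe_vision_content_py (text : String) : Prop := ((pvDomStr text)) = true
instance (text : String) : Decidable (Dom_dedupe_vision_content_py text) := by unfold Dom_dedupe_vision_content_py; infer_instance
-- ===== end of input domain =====

-- B replaces A's divisor-enumerating, string-replicating period search by a smallest-period
-- self-overlap scan with one divisibility test, and replaces the last-element dedup loop by a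
-- zip-with-predecessor filter; same return value on every input (objective: alternative).

-- ===== PORT A =====
-- for period in range(1, n//2+1): if n % period: continue; if s == s[:period]*(n//period): return s[:period]
def pvTryPeriods (l : List Char) : List Nat → List Char
  | [] => l
  | p :: rest =>
    if l.length % p ≠ 0 then pvTryPeriods l rest
    else if l = (List.replicate (l.length / p) (l.take p)).flatten then l.take p
    else pvTryPeriods l rest

def collapse_repeated_phrase_py (s : String) : String :=
  let l := s.toList
  if l.length < 2 then s
  else String.ofList (pvTryPeriods l (List.range' 1 (l.length / 2)))

def dedupe_vision_content_py (text : String) : String :=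
  if text = "" ∨ PySem.Str.strip text = "" then text
  else
    let lines := ((PySem.Str.splitlines text).map PySem.Str.strip).filter (fun ln => ln ≠ "")
    let deduped := lines.foldl (fun acc ln =>
      let c := collapse_repeated_phrase_py ln
      if c = "" then acc
      else if acc = [] ∨ acc.getLast? ≠ some c then acc ++ [c] else acc) []
    PySem.Str.join "\n" deduped

-- ===== PORT B =====
-- any(s[i] != s[i-p] for i in range(p, n)); both indices are always in range, so getD is exact here
def pvMismatch (l : List Char) (p : Nat) : Bool :=
  (List.range' p (l.length - p)).any (fun i => l.getD i ' ' ≠ l.getD (i - p) ' ')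

-- while p < n and any(...): p += 1
def pvSpLoop (l : List Char) (p : Nat) : Nat :=
  if h : p < l.length ∧ pvMismatch l p = true then pvSpLoop l (p + 1) else p
termination_by l.length - p
decreasing_by omega

-- ln[:p] if len(ln) % p == 0 else ln
def pvCollapseLineAlt (s : String) : String :=
  let l := s.toList
  let p := pvSpLoop l 1
  if l.length % p = 0 then String.ofList (l.take p) else s

def dedupe_vision_content_py_alt (text : String) : String :=
  if text = "" ∨ PySem.Str.strip text = "" then text
  else
    let lines := (PySem.Str.splitlines text).foldl (fun acc raw =>
      let ln := PySem.Str.strip raw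
      if ln ≠ "" then acc ++ [pvCollapseLineAlt ln] else acc) []
    PySem.Str.join "\n"
      (((lines.zip (none :: lines.map some)).filter (fun xp => some xp.1 ≠ xp.2)).map (·.1))

-- ===== PRECONDITION & SPEC =====
def Spec_dedupe_vision_content_py (text : String) (out : String) : Prop := out = dedupe_vision_content_py_alt text
instance (text : String) (out : String) : Decidable (Spec_dedupe_vision_content_py text out) := by unfold Spec_dedupe_vision_content_py; infer_instance

-- ===== CLAIM (what is proved, stated in full; the proofs are below) =====
def Claim_equal_dedupe_vision_content_py : Prop := ∀ (text : String), Dom_dedupe_vision_content_py text → Spec_dedupe_vision_content_py text (dedupe_vision_content_py text)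

-- ===== LEMMAS AND PROOFS =====

-- l has period p: every position agrees with the position p earlier
def PvPeriod (l : List Char) (p : Nat) : Prop :=
  ∀ i, i + p < l.length → l.getD (i + p) ' ' = l.getD i ' '

lemma pvMismatch_false_iff (l : List Char) (p : Nat) :
    pvMismatch l p = false ↔ PvPeriod l p := by
  unfold pvMismatch PvPeriod
  rw [List.any_eq_false]
  constructor
  · intro h i hi
    have := h (i + p) (by rw [List.mem_range'_1]; omega)
    simp only [Nat.add_sub_cancel] at this
    simpa using this
  · intro h x hx
    rw [List.mem_range'_1] at hx
    have := h (x - p) (by omega)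
    have hxp : x - p + p = x := by omega
    rw [hxp] at this
    simpa using this

lemma pvPeriod_of_ge (l : List Char) (p : Nat) (h : l.length ≤ p) : PvPeriod l p := by
  intro i hi; omega

lemma pvSpLoop_spec (l : List Char) (p : Nat) :
    PvPeriod l (pvSpLoop l p) ∧ p ≤ pvSpLoop l p ∧ pvSpLoop l p ≤ max p l.length ∧
      ∀ q, p ≤ q → q < pvSpLoop l p → ¬ PvPeriod l q := by
  fun_induction pvSpLoop l p with
  | case1 p h ih =>
    obtain ⟨hper, hle, hmax, hmin⟩ := ih
    refine ⟨hper, by omega, by omega, ?_⟩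
    intro q hq1 hq2
    rcases Nat.eq_or_lt_of_le hq1 with rfl | hlt
    · intro hP
      rw [← pvMismatch_false_iff] at hP
      simp [hP] at h
    · exact hmin q hlt hq2
  | case2 p h =>
    rw [Decidable.not_and_iff_or_not] at h
    refine ⟨?_, le_refl _, by omega, fun q h1 h2 _ => by omega⟩
    rcases h with h | h
    · exact pvPeriod_of_ge l p (by omega)
    · rw [← pvMismatch_false_iff]; simpa using h

-- elementwise: every index agrees with its residue mod p
lemma pvPeriod_mod (l : List Char) (p : Nat) (hp : 0 < p) (h : PvPeriod l p) :
    ∀ i, i < l.length → l.getD i ' ' = l.getD (i % p) ' ' := by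
  intro i
  induction i using Nat.strong_induction_on with
  | _ i ih =>
    intro hi
    by_cases hip : i < p
    · rw [Nat.mod_eq_of_lt hip]
    · rw [Nat.not_lt] at hip
      have h1 : l.getD i ' ' = l.getD (i - p) ' ' := by
        have := h (i - p) (by omega)
        rw [show i - p + p = i by omega] at this
        exact this
      have h2 := ih (i - p) (by omega) (by omega)
      have h3 : (i - p) % p = i % p := by
        conv_rhs => rw [show i = (i - p) + p by omega]
        rw [Nat.add_mod_right]
      rw [h1, h2, h3]

lemma pvGetD_flatten_replicate (t : List Char) (k i : Nat)
    (hi : i < k * t.length) :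
    ((List.replicate k t).flatten).getD i ' ' = t.getD (i % t.length) ' ' := by
  induction k generalizing i with
  | zero => omega
  | succ k ih =>
    rw [List.replicate_succ, List.flatten_cons]
    by_cases hlt : i < t.length
    · rw [List.getD_append _ _ _ _ hlt, Nat.mod_eq_of_lt hlt]
    · rw [Nat.not_lt] at hlt
      have hexp : (k+1) * t.length = k * t.length + t.length := by ring
      rw [List.getD_append_right _ _ _ _ hlt, ih (i - t.length) (by omega)]
      congr 1
      conv_rhs => rw [show i = (i - t.length) + t.length by omega]
      rw [Nat.add_mod_right]

-- tiling by the length-p prefix is the same as having period p, for a divisor p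
lemma pvTiles_iff (l : List Char) (p : Nat) (hp : 0 < p) (hd : p ∣ l.length) :
    l = (List.replicate (l.length / p) (l.take p)).flatten ↔ PvPeriod l p := by
  rcases Nat.eq_zero_or_pos l.length with h0 | hpos
  · have : l = [] := List.length_eq_zero_iff.mp h0
    subst this
    simp [PvPeriod]
  have hple : p ≤ l.length := Nat.le_of_dvd hpos hd
  have htlen : (l.take p).length = p := by simp [Nat.min_eq_left hple]
  have hkp : l.length / p * (l.take p).length = l.length := by
    rw [htlen, Nat.div_mul_cancel hd]
  constructor
  · intro heq i hi
    have g : ∀ j, j < l.length → l.getD j ' ' = (l.take p).getD (j % p) ' ' := by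
      intro j hj
      conv_lhs => rw [heq]
      rw [pvGetD_flatten_replicate _ _ _ (by omega), htlen]
    have e1 := g (i + p) hi
    have e2 := g i (by omega)
    rw [e1, e2, Nat.add_mod_right]
  · intro hper
    have hmod := pvPeriod_mod l p hp hper
    apply List.ext_getElem
    · simp [List.length_flatten, htlen, Nat.div_mul_cancel hd]
    · intro i h1 h2
      have hflat : ((List.replicate (l.length / p) (l.take p)).flatten).getD i ' '
          = (l.take p).getD (i % p) ' ' := by
        rw [pvGetD_flatten_replicate _ _ _ (by omega), htlen]
      have htake : (l.take p).getD (i % p) ' ' = l.getD (i % p) ' ' := by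
        have him : i % p < p := Nat.mod_lt _ hp
        rw [List.getD_eq_getElem _ _ (by omega), List.getD_eq_getElem _ _ (by omega)]
        simp
      rw [← List.getD_eq_getElem l ' ' h1, ← List.getD_eq_getElem _ ' ' h2,
        hflat, htake, ← hmod i h1]

-- if p ≤ q are periods and p + q ≤ |l| then q - p is a period
lemma pvPeriod_sub (l : List Char) (p q : Nat) (_hp : 0 < p) (hpq : p ≤ q)
    (hn : p + q ≤ l.length) (h1 : PvPeriod l p) (h2 : PvPeriod l q) :
    PvPeriod l (q - p) := by
  intro i hi
  by_cases hc : i + q < l.length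
  · have e1 : l.getD (i + (q - p) + p) ' ' = l.getD (i + (q - p)) ' ' :=
      h1 (i + (q - p)) (by omega)
    have e2 : l.getD (i + q) ' ' = l.getD i ' ' := h2 i hc
    rw [show i + (q - p) + p = i + q by omega] at e1
    rw [← e1, e2]
  · have e1 : l.getD (i - p + p) ' ' = l.getD (i - p) ' ' := h1 (i - p) (by omega)
    rw [show i - p + p = i by omega] at e1
    have e2 : l.getD (i - p + q) ' ' = l.getD (i - p) ' ' := h2 (i - p) (by omega)
    rw [show i - p + q = i + (q - p) by omega] at e2
    rw [e2, ← e1]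

-- weak Fine–Wilf: two periods with p + q ≤ |l| give the gcd as a period
lemma pvPeriod_gcd (l : List Char) : ∀ s p q, p + q = s → 0 < p → 0 < q →
    p + q ≤ l.length → PvPeriod l p → PvPeriod l q → PvPeriod l (Nat.gcd p q) := by
  intro s
  induction s using Nat.strong_induction_on with
  | _ s ih =>
    intro p q hs hp hq hn h1 h2
    rcases lt_trichotomy p q with hlt | heq | hgt
    · have hsub : PvPeriod l (q - p) := pvPeriod_sub l p q hp (by omega) hn h1 h2
      have := ih (p + (q - p)) (by omega) p (q - p) rfl hp (by omega) (by omega) h1 hsub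
      rwa [Nat.gcd_sub_self_right (by omega)] at this
    · subst heq; rwa [Nat.gcd_self]
    · have hsub : PvPeriod l (p - q) := pvPeriod_sub l q p hq (by omega) (by omega) h2 h1
      have := ih (q + (p - q)) (by omega) (p - q) q (by omega) (by omega) hq (by omega) hsub h2
      rwa [Nat.gcd_sub_self_left (by omega)] at this

-- A's search over range' a m when every candidate fails
lemma pvTryPeriods_all_fail (l : List Char) (a m : Nat) (ha : 0 < a)
    (h : ∀ q, a ≤ q → q < a + m → ¬ (q ∣ l.length ∧ PvPeriod l q)) :
    pvTryPeriods l (List.range' a m) = l := by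
  induction m generalizing a with
  | zero => simp [pvTryPeriods]
  | succ m ih =>
    rw [List.range'_succ, pvTryPeriods]
    have hfail := h a (le_refl a) (by omega)
    by_cases hdvd : l.length % a = 0
    · have hd : a ∣ l.length := Nat.dvd_of_mod_eq_zero hdvd
      have hnt : ¬ (l = (List.replicate (l.length / a) (l.take a)).flatten) := by
        rw [pvTiles_iff l a ha hd]
        intro hper; exact hfail ⟨hd, hper⟩
      rw [if_neg (by simpa using hdvd), if_neg hnt]
      exact ih (a + 1) (by omega) (fun q h1 h2 => h q (by omega) (by omega))
    · rw [if_pos (by simpa using hdvd)]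
      exact ih (a + 1) (by omega) (fun q h1 h2 => h q (by omega) (by omega))

-- A's search finds the first success p0
lemma pvTryPeriods_finds (l : List Char) (a m p0 : Nat) (ha : 0 < a) (hap : a ≤ p0)
    (hm : p0 < a + m) (hp : p0 ∣ l.length ∧ PvPeriod l p0)
    (h : ∀ q, a ≤ q → q < p0 → ¬ (q ∣ l.length ∧ PvPeriod l q)) :
    pvTryPeriods l (List.range' a m) = l.take p0 := by
  induction m generalizing a with
  | zero => omega
  | succ m ih =>
    rw [List.range'_succ, pvTryPeriods]
    rcases Nat.eq_or_lt_of_le hap with rfl | hlt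
    · have hdvd : l.length % a = 0 := Nat.mod_eq_zero_of_dvd hp.1
      rw [if_neg (by simpa using hdvd), if_pos ((pvTiles_iff l a ha hp.1).mpr hp.2)]
    · have hfail := h a (le_refl a) hlt
      by_cases hdvd : l.length % a = 0
      · have hd : a ∣ l.length := Nat.dvd_of_mod_eq_zero hdvd
        have hnt : ¬ (l = (List.replicate (l.length / a) (l.take a)).flatten) := by
          rw [pvTiles_iff l a ha hd]
          intro hper; exact hfail ⟨hd, hper⟩
        rw [if_neg (by simpa using hdvd), if_neg hnt]
        exact ih (a + 1) (by omega) (by omega) (by omega) (fun q h1 h2 => h q (by omega) h2)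
      · rw [if_pos (by simpa using hdvd)]
        exact ih (a + 1) (by omega) (by omega) (by omega) (fun q h1 h2 => h q (by omega) h2)

-- the two collapses agree on every string
lemma pvCollapse_eq (s : String) :
    collapse_repeated_phrase_py s = pvCollapseLineAlt s := by
  have hA : collapse_repeated_phrase_py s
      = if s.toList.length < 2 then s
        else String.ofList (pvTryPeriods s.toList (List.range' 1 (s.toList.length / 2))) := rfl
  have hB : pvCollapseLineAlt s
      = if s.toList.length % (pvSpLoop s.toList 1) = 0
        then String.ofList (s.toList.take (pvSpLoop s.toList 1)) else s := rfl
  rw [hA, hB]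
  obtain ⟨hper, h1le, hmax, hmin⟩ := pvSpLoop_spec s.toList 1
  set p0 := pvSpLoop s.toList 1 with hp0
  set l := s.toList with hl
  have hofl : String.ofList l = s := by rw [hl, String.ofList_toList]
  by_cases hn2 : l.length < 2
  · have hp0n : p0 = 1 := by
      rw [hp0, pvSpLoop, dif_neg]
      intro hc
      rcases hc with ⟨h1, h2⟩
      have hm1 : pvMismatch l 1 = false := by
        rw [pvMismatch_false_iff]
        intro i hi; omega
      rw [hm1] at h2; exact absurd h2 (by simp)
    rw [if_pos hn2, hp0n]
    rw [if_pos (Nat.mod_one _), List.take_of_length_le (by omega), hofl]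
  · rw [if_neg hn2]
    have hp0pos : 0 < p0 := by omega
    have hp0le : p0 ≤ l.length := by omega
    by_cases hd : l.length % p0 = 0
    · rw [if_pos hd]
      have hdvd : p0 ∣ l.length := Nat.dvd_of_mod_eq_zero hd
      by_cases hlt : p0 < l.length
      · have h2p : 2 * p0 ≤ l.length := by
          obtain ⟨k, hk⟩ := hdvd
          have hk0 : k ≠ 0 := by rintro rfl; omega
          have hk1 : k ≠ 1 := by rintro rfl; omega
          have : 2 ≤ k := by omega
          calc 2 * p0 ≤ p0 * k := by nlinarith
            _ = l.length := hk.symm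
        rw [pvTryPeriods_finds l 1 (l.length / 2) p0 one_pos h1le (by omega)
          ⟨hdvd, hper⟩ (fun q hq1 hq2 hqc => hmin q hq1 hq2 hqc.2)]
      · have hp0n : p0 = l.length := by omega
        rw [pvTryPeriods_all_fail l 1 (l.length / 2) one_pos
          (fun q hq1 hq2 hqc => hmin q hq1 (by omega) hqc.2)]
        rw [hp0n, List.take_length]
    · rw [if_neg hd]
      rw [pvTryPeriods_all_fail l 1 (l.length / 2) one_pos ?_, hofl]
      intro q hq1 hq2 hqc
      have hqp0 : p0 ≤ q := by
        by_contra hc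
        exact hmin q hq1 (by omega) hqc.2
      have hgcd := pvPeriod_gcd l (p0 + q) p0 q rfl (by omega) (by omega)
        (by omega) hper hqc.2
      have hgle : Nat.gcd p0 q ≤ p0 := Nat.le_of_dvd hp0pos (Nat.gcd_dvd_left p0 q)
      have hgpos : 0 < Nat.gcd p0 q := Nat.gcd_pos_of_pos_left q hp0pos
      have hge : Nat.gcd p0 q = p0 := by
        by_contra hne
        exact hmin _ (by omega) (by omega) hgcd
      have hpq : p0 ∣ q := hge ▸ Nat.gcd_dvd_right p0 q
      exact hd (Nat.mod_eq_zero_of_dvd (hpq.trans hqc.1))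

-- the collapse of a nonempty line is nonempty
lemma pvCollapse_ne (s : String) (h : s ≠ "") : pvCollapseLineAlt s ≠ "" := by
  have hB : pvCollapseLineAlt s
      = if s.toList.length % (pvSpLoop s.toList 1) = 0
        then String.ofList (s.toList.take (pvSpLoop s.toList 1)) else s := rfl
  rw [hB]
  obtain ⟨_, h1le, _, _⟩ := pvSpLoop_spec s.toList 1
  have hne : s.toList ≠ [] := by
    intro h0
    apply h
    have := congrArg String.ofList h0
    rwa [String.ofList_toList] at this
  split
  · intro he
    have := String.ofList_eq.mp he
    simp at this
    rcases this with h0 | h0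
    · omega
    · apply hne
      rw [h0]
      rfl
  · exact h

-- B's line-building fold is map-after-filter
lemma pvBuild_fold (sl : List String) (acc : List String) :
    sl.foldl (fun acc raw =>
      let ln := PySem.Str.strip raw
      if ln ≠ "" then acc ++ [pvCollapseLineAlt ln] else acc) acc
    = acc ++ ((sl.map PySem.Str.strip).filter (fun ln => ln ≠ "")).map pvCollapseLineAlt := by
  induction sl generalizing acc with
  | nil => simp
  | cons x sl ih =>
    simp only [List.foldl_cons, List.map_cons, List.filter_cons]
    by_cases hx : PySem.Str.strip x ≠ ""
    · rw [ih]
      simp [hx]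
    · rw [ih]
      simp at hx
      simp [hx]

-- A's dedup fold is B's zip-with-predecessor filter
lemma pvDedup_fold (L : List String) (acc : List String) (prev : Option String)
    (hne : ∀ x ∈ L, x ≠ "") (hprev : acc.getLast? = prev) :
    L.foldl (fun acc c =>
      if c = "" then acc
      else if acc = [] ∨ acc.getLast? ≠ some c then acc ++ [c] else acc) acc
    = acc ++ ((L.zip (prev :: L.map some)).filter (fun xp => some xp.1 ≠ xp.2)).map (·.1) := by
  induction L generalizing acc prev with
  | nil => simp
  | cons x L ih =>
    have hx : x ≠ "" := hne x List.mem_cons_self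
    simp only [List.foldl_cons, List.map_cons, List.zip_cons_cons, List.filter_cons]
    rw [if_neg hx]
    by_cases hc : prev = some x
    · have hacc : acc ≠ [] := by
        intro h0
        rw [h0] at hprev
        simp at hprev
        rw [← hprev] at hc
        exact absurd hc (by simp)
      rw [if_neg (by
        rw [hprev]
        simp only [not_or]
        exact ⟨hacc, by rw [hc]; simp⟩)]
      rw [if_neg (by simp [hc])]
      exact ih acc (some x) (fun y hy => hne y (List.mem_cons_of_mem _ hy)) (by rw [hprev, hc])
    · rw [if_pos (Or.inr (by rw [hprev]; exact hc))]
      rw [if_pos (by simpa using fun h => hc h.symm)]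
      rw [ih (acc ++ [x]) (some x) (fun y hy => hne y (List.mem_cons_of_mem _ hy))
        (by rw [List.getLast?_concat])]
      simp

-- ===== VERDICT (by name: the statement is the Claim_ definition above) =====
theorem dedupe_vision_content_py_spec : Claim_equal_dedupe_vision_content_py := by
  intro text _
  unfold Spec_dedupe_vision_content_py dedupe_vision_content_py dedupe_vision_content_py_alt
  by_cases hguard : text = "" ∨ PySem.Str.strip text = ""
  · rw [if_pos hguard, if_pos hguard]
  · rw [if_neg hguard, if_neg hguard]
    simp only
    set lines := ((PySem.Str.splitlines text).map PySem.Str.strip).filter (fun ln => ln ≠ "") with hlines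
    have hB := pvBuild_fold (PySem.Str.splitlines text) []
    rw [hB]
    simp only [List.nil_append]
    set L := lines.map pvCollapseLineAlt with hL
    have hmapeq : lines.map collapse_repeated_phrase_py = L := by
      rw [hL]
      exact List.map_congr_left (fun x _ => pvCollapse_eq x)
    have hA : lines.foldl (fun acc ln =>
        let c := collapse_repeated_phrase_py ln
        if c = "" then acc
        else if acc = [] ∨ acc.getLast? ≠ some c then acc ++ [c] else acc) []
        = (lines.map collapse_repeated_phrase_py).foldl (fun acc c =>
        if c = "" then acc
        else if acc = [] ∨ acc.getLast? ≠ some c then acc ++ [c] else acc) [] := by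
      rw [List.foldl_map]
    rw [hA, hmapeq]
    rw [pvDedup_fold L [] none ?_ (by simp)]
    · simp
    · intro x hx
      rw [hL] at hx
      obtain ⟨y, hy, rfl⟩ := List.mem_map.mp hx
      have hyne : y ≠ "" := by
        rw [hlines] at hy
        exact (List.mem_filter.mp hy).2 |> fun h => by simpa using h
      exact pvCollapse_ne y hyne
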